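-- pv_equiv track=rewrite | github.com/pypi-data/pypi-mirror-404 | packages/ansible-doc-template-extractor/ansible_doc_template_extractor-0.16.0.tar.gz/ansible_doc_template_extractor-0.16.0/src/ansible_doc_template_extractor/cli.py | normalized_text
-- ===== SOURCE A (Python) =====
-- LIST_STARTERS = ("*", "-", "#")
--
-- def normalized_text(text):
--     """
--     Return normalized text by:
--     * Inserting a blank line before a bullet line if the previous line is not
--       empty.
--     * Inserting a blank line after a bullet line if the next line is not empty
--       and not a bullet line
--     """
--     lines = text.splitlines()
--     normalized_lines = []
--     for i, line in enumerate(lines):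
--         stripped = line.strip()
--
--         # Insert blank line before a bullet line
--         if (stripped.startswith(LIST_STARTERS) and i > 0
--                 and lines[i - 1].strip() != ""):
--             normalized_lines.append("")
--         normalized_lines.append(line)
--
--         # Insert blank line after a bullet line
--         if (stripped.startswith(LIST_STARTERS) and i + 1 < len(lines)
--                 and not lines[i + 1].strip().startswith(LIST_STARTERS)
--                 and lines[i + 1].strip() != ""):
--             normalized_lines.append("")
--
--     normalized_str = "\n".join(normalized_lines)
--     return normalized_str
-- ===== SOURCE B (Python) =====
-- LIST_STARTERS = ("*", "-", "#")
--
--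
-- def _category(line):
--     s = line.strip()
--     if s.startswith(LIST_STARTERS):
--         return 1  # bullet
--     return 2 if s else 0  # text / blank
--
--
-- def normalized_text(text):
--     """Stage 1: group the lines into maximal runs of equal category
--     (blank / bullet / text).  Stage 2: join each run internally (bullet
--     runs get a blank line between members) and join adjacent runs with a
--     separator chosen from a table on the pair of run categories."""
--     runs = []  # list of (category, [lines...])
--     for line in text.splitlines():
--         c = _category(line)
--         if runs and runs[-1][0] == c:
--             runs[-1][1].append(line)
--         else:
--             runs.append((c, [line]))
--     parts = []
--     prev = None
--     for c, group in runs: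
--         if prev is not None:
--             wide = (c == 1 and prev != 0) or (prev == 1 and c == 2)
--             parts.append("\n\n" if wide else "\n")
--         parts.append(("\n\n" if c == 1 else "\n").join(group))
--         prev = c
--     return "".join(parts)
-- ===== Notes on version B (the rewrite author's own statement) =====
-- stated objective: alternative
-- what changed: Replaced A's single indexed pass (per-line lines[i-1]/lines[i+1] lookups with two insertion rules) by two staged passes: group the lines into maximal runs of equal category (blank/bullet/text), then join each run internally and join adjacent runs with a separator chosen from a table on the pair of run categories.
import Mathlib
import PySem

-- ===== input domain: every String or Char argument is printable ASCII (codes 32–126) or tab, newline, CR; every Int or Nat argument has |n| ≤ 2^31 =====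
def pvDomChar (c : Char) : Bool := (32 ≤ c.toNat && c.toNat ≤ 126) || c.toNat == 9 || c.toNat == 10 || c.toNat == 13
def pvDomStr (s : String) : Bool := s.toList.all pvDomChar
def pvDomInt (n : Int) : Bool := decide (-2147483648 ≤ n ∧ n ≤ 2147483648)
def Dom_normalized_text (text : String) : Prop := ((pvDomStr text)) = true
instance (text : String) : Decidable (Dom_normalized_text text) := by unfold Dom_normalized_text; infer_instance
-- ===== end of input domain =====

-- B re-decomposes A's single indexed pass into two staged passes: group the lines
-- into maximal runs of equal category (blank/bullet/text), then join runs with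
-- table-driven separators (objective: alternative decomposition).


-- ===== PORT A =====
-- stripped.startswith(LIST_STARTERS) with LIST_STARTERS = ("*", "-", "#")
def pvBullet (s : String) : Bool :=
  PySem.Str.startswith s "*" || PySem.Str.startswith s "-" || PySem.Str.startswith s "#"

-- A's loop body: the two conditional blank-line appends around each line, with the
-- original lines[i-1] / lines[i+1] lookups (the i>0 / i+1<len guards keep them in range)
def pvStepA (lines : List String) (acc : List String) (p : Int × String) : List String :=
  let i := p.1
  let line := p.2
  let stripped := PySem.Str.strip line
  let acc :=
    if pvBullet stripped && decide (0 < i)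
        && decide (PySem.Str.strip (PySem.List.pyGetD lines (i - 1) "") ≠ "") then
      acc ++ [""]
    else acc
  let acc := acc ++ [line]
  if pvBullet stripped && decide (i + 1 < (lines.length : Int))
      && !pvBullet (PySem.Str.strip (PySem.List.pyGetD lines (i + 1) ""))
      && decide (PySem.Str.strip (PySem.List.pyGetD lines (i + 1) "") ≠ "") then
    acc ++ [""]
  else acc

def normalized_text (text : String) : String :=
  let lines := PySem.Str.splitlines text
  let normalized_lines := (PySem.List.enumerate lines).foldl (pvStepA lines) []
  PySem.Str.join "\n" normalized_lines

-- ===== PORT B =====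
-- Source B's _category: 1 = bullet, 2 = text, 0 = blank
def pvCategory (line : String) : Nat :=
  let s := PySem.Str.strip line
  if pvBullet s then 1 else if s ≠ "" then 2 else 0

-- stage 1 loop body: extend the last run if the category matches, else open a new run
def pvAddRun (runs : List (Nat × List String)) (line : String) : List (Nat × List String) :=
  let c := pvCategory line
  match runs.getLast? with
  | some r => if r.1 = c then runs.dropLast ++ [(c, r.2 ++ [line])] else runs ++ [(c, [line])]
  | none => [(c, [line])]

-- stage 2 loop body: separator from the (prev category, category) table, then the joined run
def pvEmitRun (st : List String × Option Nat) (r : Nat × List String) : List String × Option Nat :=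
  let parts :=
    match st.2 with
    | none => st.1
    | some p => st.1 ++ [if (r.1 = 1 ∧ p ≠ 0) ∨ (p = 1 ∧ r.1 = 2) then "\n\n" else "\n"]
  (parts ++ [PySem.Str.join (if r.1 = 1 then "\n\n" else "\n") r.2], some r.1)

def normalized_text_alt (text : String) : String :=
  let runs := (PySem.Str.splitlines text).foldl pvAddRun []
  PySem.Str.join "" ((runs.foldl pvEmitRun ([], none)).1)

-- ===== PRECONDITION & SPEC =====
def Spec_normalized_text (text : String) (out : String) : Prop := out = normalized_text_alt text
instance (text : String) (out : String) : Decidable (Spec_normalized_text text out) := by unfold Spec_normalized_text; infer_instance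

-- ===== CLAIM (what is proved, stated in full; the proofs are below) =====
def Claim_equal_normalized_text : Prop := ∀ (text : String), Dom_normalized_text text → Spec_normalized_text text (normalized_text text)

-- ===== LEMMAS AND PROOFS =====

-- A's boundary condition between adjacent lines, and its per-boundary emission
def pvCondB (x y : String) : Bool :=
  (pvBullet (PySem.Str.strip y) && decide (PySem.Str.strip x ≠ ""))
  || (pvBullet (PySem.Str.strip x) && decide (PySem.Str.strip y ≠ "")
      && !pvBullet (PySem.Str.strip y))

def pvG (q : String × String) : List String :=
  (if pvCondB q.1 q.2 then [""] else []) ++ [q.2]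

-- A's emission for one (index, line) pair, as three named pieces
def pvBeforeA (lines : List String) (i : Int) (line : String) : List String :=
  if pvBullet (PySem.Str.strip line) && decide (0 < i)
      && decide (PySem.Str.strip (PySem.List.pyGetD lines (i - 1) "") ≠ "") then [""] else []

def pvAfterA (lines : List String) (i : Int) (line : String) : List String :=
  if pvBullet (PySem.Str.strip line) && decide (i + 1 < (lines.length : Int))
      && !pvBullet (PySem.Str.strip (PySem.List.pyGetD lines (i + 1) ""))
      && decide (PySem.Str.strip (PySem.List.pyGetD lines (i + 1) "") ≠ "") then [""] else []

def pvEmitA (lines : List String) (p : Int × String) : List String :=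
  pvBeforeA lines p.1 p.2 ++ [p.2] ++ pvAfterA lines p.1 p.2

-- A's "blank before" as a function of the optional previous line
def pvBBL : Option String → String → List String
  | none, _ => []
  | some pr, x =>
      if pvBullet (PySem.Str.strip x) && decide (PySem.Str.strip pr ≠ "") then [""] else []

theorem pv_bool1 : ∀ a b c : Bool,
    (if a && true && !b && c then ([""] : List String) else [])
    = if a && c && !b then [""] else [] := by decide

theorem pv_bool2 : ∀ a b e p : Bool,
    ((if a && e && !b then ([""] : List String) else []) ++ if b && p then [""] else [])
    = if b && p || a && e && !b then [""] else [] := by decide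

theorem pvStepA_eq (lines acc : List String) (p : Int × String) :
    pvStepA lines acc p = acc ++ pvEmitA lines p := by
  simp only [pvStepA, pvEmitA, pvBeforeA, pvAfterA]
  split_ifs <;> simp

theorem foldl_stepA (lines : List String) (el : List (Int × String)) (acc : List String) :
    el.foldl (pvStepA lines) acc = acc ++ el.flatMap (pvEmitA lines) := by
  induction el generalizing acc with
  | nil => simp
  | cons q t ih => rw [List.foldl_cons, pvStepA_eq, List.flatMap_cons, ih, List.append_assoc]

theorem pvBeforeA_eq (pre ys : List String) (x : String) :
    pvBeforeA (pre ++ x :: ys) (pre.length : Int) x = pvBBL pre.getLast? x := by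
  rcases List.eq_nil_or_concat pre with rfl | ⟨q, p, rfl⟩
  · simp [pvBeforeA, pvBBL]
  · simp only [List.concat_eq_append, pvBeforeA, pvBBL, List.getLast?_concat]
    have h1 : (((q ++ [p]).length : Nat) : Int) - 1 = ((q.length : Nat) : Int) := by
      simp
    have h0 : decide ((0 : Int) < (((q ++ [p]).length : Nat) : Int)) = true := by
      simp
    rw [h1, h0, PySem.List.pyGetD_natCast]
    have h2 : (q ++ [p] ++ x :: ys).getD q.length "" = p := by
      rw [List.append_assoc, List.getD, List.getElem?_append_right (le_refl _)]
      simp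
    rw [h2]
    simp

theorem pvAfterA_nil (pre : List String) (x : String) :
    pvAfterA (pre ++ [x]) (pre.length : Int) x = [] := by
  simp only [pvAfterA]
  have h : decide ((pre.length : Int) + 1 < (((pre ++ [x]).length : Nat) : Int)) = false := by
    simp
  rw [h]
  simp

theorem pvAfterA_cons (pre : List String) (x y : String) (ys : List String) :
    pvAfterA (pre ++ x :: y :: ys) (pre.length : Int) x
    = (if pvBullet (PySem.Str.strip x) && decide (PySem.Str.strip y ≠ "")
          && !pvBullet (PySem.Str.strip y) then [""] else []) := by
  simp only [pvAfterA]
  have hl : decide ((pre.length : Int) + 1 < (((pre ++ x :: y :: ys).length : Nat) : Int)) = true := by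
    simp
  have h1 : ((pre.length : Nat) : Int) + 1 = (((pre.length + 1 : Nat)) : Int) := by push_cast; ring
  rw [hl, h1, PySem.List.pyGetD_natCast]
  have h2 : (pre ++ x :: y :: ys).getD (pre.length + 1) "" = y := by
    rw [List.getD, List.getElem?_append_right (by omega)]
    simp
  rw [h2]
  exact pv_bool1 _ _ _

-- the "after" blank of x and the "before" blank of y merge into one boundary blank
theorem pv_merge (x y : String) (t : List String) :
    (if pvBullet (PySem.Str.strip x) && decide (PySem.Str.strip y ≠ "")
        && !pvBullet (PySem.Str.strip y) then ([""] : List String) else [])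
    ++ (pvBBL (some x) y ++ t)
    = (if pvCondB x y then [""] else []) ++ t := by
  rw [← List.append_assoc]
  have h : (if pvBullet (PySem.Str.strip x) && decide (PySem.Str.strip y ≠ "")
        && !pvBullet (PySem.Str.strip y) then ([""] : List String) else [])
      ++ pvBBL (some x) y = (if pvCondB x y then [""] else []) := by
    simp only [pvBBL, pvCondB]
    exact pv_bool2 _ _ _ _
  rw [h]

-- A's whole emission list, characterised per boundary
theorem pv_main (xs : List String) : ∀ (x : String) (pre : List String),
    (PySem.List.enumerate (x :: xs) (pre.length : Int)).flatMap (pvEmitA (pre ++ x :: xs))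
    = pvBBL pre.getLast? x ++ x :: ((x :: xs).zip xs).flatMap pvG := by
  induction xs with
  | nil =>
      intro x pre
      rw [PySem.List.enumerate_cons, PySem.List.enumerate_nil]
      simp only [List.flatMap_cons, List.flatMap_nil, List.append_nil, List.zip_nil_right,
        pvEmitA]
      rw [pvBeforeA_eq, pvAfterA_nil]
      simp
  | cons y ys ih =>
      intro x pre
      rw [PySem.List.enumerate_cons, List.flatMap_cons]
      have hih := ih y (pre ++ [x])
      rw [List.append_assoc] at hih
      simp only [List.cons_append, List.nil_append] at hih
      have hlen : (((pre ++ [x]).length : Nat) : Int) = ((pre.length : Nat) : Int) + 1 := by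
        simp
      rw [hlen, List.getLast?_concat] at hih
      rw [hih]
      simp only [pvEmitA]
      rw [pvBeforeA_eq, pvAfterA_cons]
      rw [List.zip_cons_cons, List.flatMap_cons]
      simp only [pvG, List.append_assoc, List.cons_append, List.nil_append]
      rw [pv_merge]

-- ----- shared character-level vocabulary -----
def pvNl : List Char := ['\n']
def pvNl2 : List Char := ['\n', '\n']

-- the separator table on (previous category, category)
def pvSepC (p c : Nat) : List Char :=
  if (c = 1 ∧ p ≠ 0) ∨ (p = 1 ∧ c = 2) then pvNl2 else pvNl

-- a run's internal joined text
def pvChunkC (c : Nat) (g : List String) : List Char :=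
  PySem.Chars.join (if c = 1 then pvNl2 else pvNl) (g.map String.toList)

-- the normalized text of a line list, boundary by boundary
def pvS : List String → List Char
  | [] => []
  | [a] => a.toList
  | a :: b :: t => a.toList ++ pvSepC (pvCategory a) (pvCategory b) ++ pvS (b :: t)

-- the text stage 2 produces from a run list (pvExp: with a pending previous category)
def pvExp : Nat → List (Nat × List String) → List Char
  | _, [] => []
  | p, (c, g) :: rs => pvSepC p c ++ pvChunkC c g ++ pvExp c rs

def pvOut : List (Nat × List String) → List Char
  | [] => []
  | (c, g) :: rs => pvChunkC c g ++ pvExp c rs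

-- category of the last run, with default
def pvLastCatD (p : Nat) (rs : List (Nat × List String)) : Nat :=
  match rs.getLast? with
  | none => p
  | some r => r.1

-- ----- little facts -----
theorem pvBullet_ne_empty (s : String) (h : pvBullet s = true) : s ≠ "" := by
  intro hs
  subst hs
  exact absurd h (by decide)

theorem pv_sep_eq (x y : String) :
    (if pvCondB x y then pvNl2 else pvNl) = pvSepC (pvCategory x) (pvCategory y) := by
  simp only [pvCondB, pvCategory, pvSepC]
  by_cases hbx : pvBullet (PySem.Str.strip x) <;>
    by_cases hby : pvBullet (PySem.Str.strip y) <;>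
      by_cases hex : PySem.Str.strip x = "" <;>
        by_cases hey : PySem.Str.strip y = "" <;>
          first
            | exact absurd hex (pvBullet_ne_empty _ hbx)
            | exact absurd hey (pvBullet_ne_empty _ hby)
            | simp [hbx, hby, hex, hey, show pvBullet "" = false from by decide]

theorem pv_sep_diag (c : Nat) : pvSepC c c = (if c = 1 then pvNl2 else pvNl) := by
  by_cases h : c = 1 <;> simp [pvSepC, h]

-- join with "\n" of A's boundary list is pvS
theorem pv_joinA (rest : List String) : ∀ l0 : String,
    PySem.Chars.join pvNl ((l0 :: ((l0 :: rest).zip rest).flatMap pvG).map String.toList)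
    = pvS (l0 :: rest) := by
  induction rest with
  | nil =>
      intro l0
      simp [PySem.Chars.join_singleton, pvS]
  | cons y t ih =>
      intro l0
      rw [List.zip_cons_cons, List.flatMap_cons]
      have hy := ih y
      simp only [List.map_cons] at hy
      by_cases h : pvCondB l0 y
      · have hs : pvSepC (pvCategory l0) (pvCategory y) = pvNl2 := by
          rw [← pv_sep_eq, if_pos h]
        simp only [pvG, if_pos h, List.cons_append, List.nil_append, List.map_cons]
        rw [PySem.Chars.join_cons_cons, PySem.Chars.join_cons_cons,
          show ("" : String).toList = [] from rfl, hy]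
        simp [pvS, hs, pvNl, pvNl2]
      · have hs : pvSepC (pvCategory l0) (pvCategory y) = pvNl := by
          rw [← pv_sep_eq, if_neg h]
        simp only [pvG, if_neg h, List.cons_append, List.nil_append, List.map_cons]
        rw [PySem.Chars.join_cons_cons, hy]
        simp [pvS, hs]

-- join with "" is concatenation
theorem pv_join_nil_flatten (l : List (List Char)) :
    PySem.Chars.join [] l = l.flatten := by
  induction l with
  | nil => simp [PySem.Chars.join_nil]
  | cons a t ih =>
      cases t with
      | nil => simp [PySem.Chars.join_singleton]
      | cons b t' =>
          rw [PySem.Chars.join_cons_cons, ih]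
          simp

-- join over a snoc'ed part list
theorem pv_join_snoc (sep a : List Char) (l : List (List Char)) (h : l ≠ []) :
    PySem.Chars.join sep (l ++ [a]) = PySem.Chars.join sep l ++ sep ++ a := by
  induction l with
  | nil => exact absurd rfl h
  | cons x t ih =>
      cases t with
      | nil => simp [PySem.Chars.join_cons_cons, PySem.Chars.join_singleton]
      | cons b t' =>
          have e1 : x :: ((b :: t') ++ [a]) = x :: b :: (t' ++ [a]) := rfl
          have e2 : b :: (t' ++ [a]) = (b :: t') ++ [a] := rfl
          rw [List.cons_append, e1, PySem.Chars.join_cons_cons, e2, ih (by simp),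
            PySem.Chars.join_cons_cons]
          simp

-- the two "\n\n"/"\n" string literals, char side
theorem pv_sepStr_toList (P : Prop) [Decidable P] :
    (if P then ("\n\n" : String) else "\n").toList = (if P then pvNl2 else pvNl) := by
  split_ifs <;> rfl

-- stage 2's fold, characterised by pvExp
theorem pv_emit_some (rs : List (Nat × List String)) :
    ∀ (parts : List String) (p : Nat),
    (((rs.foldl pvEmitRun (parts, some p)).1).map String.toList).flatten
    = ((parts.map String.toList).flatten) ++ pvExp p rs := by
  induction rs with
  | nil => intro parts p; simp [pvExp]
  | cons r rs ih =>
      intro parts p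
      obtain ⟨c, g⟩ := r
      rw [List.foldl_cons]
      show (((rs.foldl pvEmitRun
        ((parts ++ [if (c = 1 ∧ p ≠ 0) ∨ (p = 1 ∧ c = 2) then "\n\n" else "\n"])
          ++ [PySem.Str.join (if c = 1 then "\n\n" else "\n") g], some c)).1).map String.toList).flatten = _
      rw [ih]
      have h1 : (PySem.Str.join (if c = 1 then "\n\n" else "\n") g).toList = pvChunkC c g := by
        rw [PySem.Str.toList_join, pvChunkC]
        congr 1
        exact pv_sepStr_toList (c = 1)
      have h2 : (if (c = 1 ∧ p ≠ 0) ∨ (p = 1 ∧ c = 2) then ("\n\n" : String) else "\n").toList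
          = pvSepC p c := pv_sepStr_toList _
      simp [pvExp, h1, h2]

theorem pv_emit_full (runs : List (Nat × List String)) :
    (((runs.foldl pvEmitRun ([], none)).1).map String.toList).flatten = pvOut runs := by
  cases runs with
  | nil => simp [pvOut]
  | cons r rs =>
      obtain ⟨c, g⟩ := r
      rw [List.foldl_cons]
      show (((rs.foldl pvEmitRun
        ([PySem.Str.join (if c = 1 then "\n\n" else "\n") g], some c)).1).map String.toList).flatten = _
      rw [pv_emit_some]
      have h1 : (PySem.Str.join (if c = 1 then "\n\n" else "\n") g).toList = pvChunkC c g := by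
        rw [PySem.Str.toList_join, pvChunkC]
        congr 1
        exact pv_sepStr_toList (c = 1)
      simp [pvOut, h1]

theorem pv_lastCatD_cons (p c : Nat) (g : List String) (rs : List (Nat × List String)) :
    pvLastCatD p ((c, g) :: rs) = pvLastCatD c rs := by
  cases rs with
  | nil => simp [pvLastCatD]
  | cons r t =>
      obtain ⟨a, ha⟩ : ∃ a, (r :: t).getLast? = some a :=
        ⟨(r :: t).getLast (by simp), List.getLast?_eq_some_getLast (by simp)⟩
      simp [pvLastCatD, List.getLast?_cons_cons, ha]

-- extending the LAST run's group by one line appends "run separator ++ line"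
theorem pv_exp_extend (rs : List (Nat × List String)) :
    ∀ (p c : Nat) (g : List String) (x : String), g ≠ [] →
    pvExp p (rs ++ [(c, g ++ [x])])
    = pvExp p (rs ++ [(c, g)]) ++ (if c = 1 then pvNl2 else pvNl) ++ x.toList := by
  induction rs with
  | nil =>
      intro p c g x hg
      simp only [List.nil_append, pvExp, pvChunkC, List.map_append, List.map_cons, List.map_nil]
      rw [pv_join_snoc _ _ _ (by simpa using hg)]
      simp
  | cons r rs ih =>
      intro p c g x hg
      obtain ⟨c0, g0⟩ := r
      simp only [List.cons_append, pvExp]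
      rw [ih c0 c g x hg]
      simp

theorem pv_out_extend (rs : List (Nat × List String)) (c : Nat) (g : List String) (x : String)
    (hg : g ≠ []) :
    pvOut (rs ++ [(c, g ++ [x])])
    = pvOut (rs ++ [(c, g)]) ++ (if c = 1 then pvNl2 else pvNl) ++ x.toList := by
  cases rs with
  | nil =>
      simp only [List.nil_append, pvOut, pvExp, pvChunkC, List.map_append, List.map_cons,
        List.map_nil]
      rw [pv_join_snoc _ _ _ (by simpa using hg)]
      simp
  | cons r rs =>
      obtain ⟨c0, g0⟩ := r
      simp only [List.cons_append, pvOut]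
      rw [pv_exp_extend rs c0 c g x hg]
      simp

-- opening a NEW singleton run appends "table separator ++ line"
theorem pv_exp_push (rs : List (Nat × List String)) :
    ∀ (p c : Nat) (x : String),
    pvExp p (rs ++ [(c, [x])])
    = pvExp p rs ++ pvSepC (pvLastCatD p rs) c ++ x.toList := by
  induction rs with
  | nil =>
      intro p c x
      simp [pvExp, pvLastCatD, pvChunkC, PySem.Chars.join_singleton]
  | cons r rs ih =>
      intro p c x
      obtain ⟨c0, g0⟩ := r
      simp only [List.cons_append, pvExp]
      rw [ih c0 c x, pv_lastCatD_cons]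
      simp

theorem pv_out_push (rs : List (Nat × List String)) (c0 : Nat) (g0 : List String) (c : Nat)
    (x : String) :
    pvOut (((c0, g0) :: rs) ++ [(c, [x])])
    = pvOut ((c0, g0) :: rs) ++ pvSepC (pvLastCatD c0 rs) c ++ x.toList := by
  simp only [List.cons_append, pvOut]
  rw [pv_exp_push rs c0 c x]
  simp

-- pvS over a snoc'ed line list
def pvLastCatS (ls : List String) : Nat :=
  match ls.getLast? with
  | none => 0
  | some a => pvCategory a

theorem pv_lastCatS_cons (a b : String) (t : List String) :
    pvLastCatS (a :: b :: t) = pvLastCatS (b :: t) := by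
  simp [pvLastCatS, List.getLast?_cons_cons]

theorem pv_S_snoc (ls : List String) : ∀ (a x : String),
    pvS ((a :: ls) ++ [x])
    = pvS (a :: ls) ++ pvSepC (pvLastCatS (a :: ls)) (pvCategory x) ++ x.toList := by
  induction ls with
  | nil =>
      intro a x
      simp [pvS, pvLastCatS]
  | cons b t ih =>
      intro a x
      have h3 : pvS ((a :: b :: t) ++ [x])
          = a.toList ++ pvSepC (pvCategory a) (pvCategory b) ++ pvS ((b :: t) ++ [x]) := rfl
      rw [h3, ih b x, pv_lastCatS_cons]
      simp [pvS]

theorem pv_out_push' (rs : List (Nat × List String)) (c' : Nat) (g : List String)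
    (c : Nat) (x : String) :
    pvOut ((rs ++ [(c', g)]) ++ [(c, [x])])
    = pvOut (rs ++ [(c', g)]) ++ pvSepC c' c ++ x.toList := by
  cases rs with
  | nil =>
      simp [pvOut, pvExp, pvChunkC, PySem.Chars.join_singleton]
  | cons r0 rs' =>
      obtain ⟨c0, g0⟩ := r0
      rw [show (((c0, g0) :: rs') ++ [(c', g)]) ++ [(c, [x])]
          = ((c0, g0) :: (rs' ++ [(c', g)])) ++ [(c, [x])] by simp]
      rw [pv_out_push (rs' ++ [(c', g)]) c0 g0 c x]
      have hl : pvLastCatD c0 (rs' ++ [(c', g)]) = c' := by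
        simp [pvLastCatD]
      rw [hl]
      simp

-- the grouping invariant: stage 1 followed by stage 2 produces pvS
theorem pv_group_main (ls : List String) :
    pvOut (ls.foldl pvAddRun []) = pvS ls
    ∧ (ls.foldl pvAddRun []).getLast?.map Prod.fst = ls.getLast?.map pvCategory
    ∧ ∀ r ∈ ls.foldl pvAddRun [], r.2 ≠ [] := by
  induction ls using List.reverseRecOn with
  | nil => simp [pvOut, pvS]
  | append_singleton ls x ih =>
      obtain ⟨ihout, ihcat, ihne⟩ := ih
      rw [List.foldl_append, List.foldl_cons, List.foldl_nil]
      by_cases hlsne : ls = []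
      · subst hlsne
        simp only [List.foldl_nil]
        refine ⟨?_, ?_, ?_⟩
        · simp [pvAddRun, pvOut, pvExp, pvChunkC, PySem.Chars.join_singleton, pvS]
        · simp [pvAddRun]
        · simp [pvAddRun]
      · obtain ⟨la, hla⟩ : ∃ la, ls.getLast? = some la :=
          ⟨ls.getLast hlsne, List.getLast?_eq_some_getLast hlsne⟩
        have hFne : ls.foldl pvAddRun [] ≠ [] := by
          intro hF
          rw [hF, hla] at ihcat
          simp at ihcat
        obtain ⟨rs, rl, hrs⟩ := (List.eq_nil_or_concat (ls.foldl pvAddRun [])).resolve_left hFne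
        rw [List.concat_eq_append] at hrs
        obtain ⟨c', g⟩ := rl
        have hc' : c' = pvCategory la := by
          rw [hrs, hla] at ihcat
          simpa using ihcat
        have hgne : g ≠ [] := by
          have := ihne (c', g) (by rw [hrs]; simp)
          simpa using this
        have hSsnoc : pvS (ls ++ [x])
            = pvS ls ++ pvSepC (pvLastCatS ls) (pvCategory x) ++ x.toList := by
          obtain ⟨a, t, hat⟩ := List.exists_cons_of_ne_nil hlsne
          subst hat
          exact pv_S_snoc t a x
        have hcatS : pvLastCatS ls = pvCategory la := by
          simp [pvLastCatS, hla]
        rw [hrs]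
        simp only [pvAddRun, List.getLast?_concat]
        by_cases hc : c' = pvCategory x
        · rw [if_pos hc]
          simp only [List.dropLast_concat]
          refine ⟨?_, ?_, ?_⟩
          · rw [pv_out_extend rs (pvCategory x) g x hgne]
            rw [← hc, ← hrs, ihout, hSsnoc, hcatS, ← hc', ← hc]
            rw [pv_sep_diag]
          · simp
          · intro r hr
            rcases List.mem_append.mp hr with hr | hr
            · exact ihne r (by rw [hrs]; exact List.mem_append.mpr (Or.inl hr))
            · simp only [List.mem_singleton] at hr
              subst hr
              simp
        · rw [if_neg hc]
          refine ⟨?_, ?_, ?_⟩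
          · rw [pv_out_push' rs c' g (pvCategory x) x]
            rw [← hrs, ihout, hSsnoc, hcatS, ← hc']
          · simp
          · intro r hr
            rcases List.mem_append.mp hr with hr | hr
            · exact ihne r (by rw [hrs]; exact hr)
            · simp only [List.mem_singleton] at hr
              subst hr
              simp

-- ===== VERDICT (by name: the statement is the Claim_ definition above) =====
theorem normalized_text_spec : Claim_equal_normalized_text := by
  intro text _
  unfold Spec_normalized_text normalized_text normalized_text_alt
  apply String.toList_inj.mp
  rcases h : PySem.Str.splitlines text with _ | ⟨l0, rest⟩
  · simp [PySem.List.enumerate_nil]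
  · simp only []
    rw [show PySem.List.enumerate (l0 :: rest) = PySem.List.enumerate (l0 :: rest) (0 : Int) from rfl]
    rw [foldl_stepA, List.nil_append]
    rw [show pvEmitA (l0 :: rest) = pvEmitA (([] : List String) ++ l0 :: rest) from rfl]
    rw [show (0 : Int) = ((([] : List String).length : Nat) : Int) from by simp]
    rw [pv_main rest l0 []]
    rw [show pvBBL ([] : List String).getLast? l0 = [] from rfl, List.nil_append]
    rw [PySem.Str.toList_join, PySem.Str.toList_join]
    rw [show ("\n" : String).toList = pvNl from rfl]
    rw [pv_joinA rest l0]
    rw [show ("" : String).toList = ([] : List Char) from rfl, pv_join_nil_flatten, pv_emit_full]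
    exact (pv_group_main (l0 :: rest)).1.symm
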